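-- pv_equiv track=rewrite | github.com/s3rvac/advent-of-code | 2023/11/aoc11_part2.py | get_galaxy_coordinates_in_expanded_universe
-- ===== SOURCE A (Python) =====
-- def get_galaxy_coordinates_in_expanded_universe(rows_to_expand, columns_to_expand, x, y):
--     expansion_factor = 1_000_000
--
--     expanded_x = 0
--     for i in range(x):
--         expanded_x += expansion_factor if i in rows_to_expand else 1
--
--     expanded_y = 0
--     for i in range(y):
--         expanded_y += expansion_factor if i in columns_to_expand else 1
--
--     return expanded_x, expanded_y
-- ===== SOURCE B (Python) =====
-- def get_galaxy_coordinates_in_expanded_universe(rows_to_expand, columns_to_expand, x, y):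
--     expansion_factor = 1_000_000
--     expanded_x = max(x, 0) + (expansion_factor - 1) * len({r for r in rows_to_expand if 0 <= r < x})
--     expanded_y = max(y, 0) + (expansion_factor - 1) * len({c for c in columns_to_expand if 0 <= c < y})
--     return expanded_x, expanded_y
-- ===== Notes on version B (the rewrite author's own statement) =====
-- stated objective: alternative
-- what changed: Replaces the two per-cell counting loops over range(x)/range(y) (each doing a list membership scan) by a closed form per axis: coordinate + (factor-1) * number of distinct expanded rows/columns below it, computed with one set comprehension; cost no longer grows with the coordinate value, though a timing run did not show a speed-up on the generated inputs.
import Mathlib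
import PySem

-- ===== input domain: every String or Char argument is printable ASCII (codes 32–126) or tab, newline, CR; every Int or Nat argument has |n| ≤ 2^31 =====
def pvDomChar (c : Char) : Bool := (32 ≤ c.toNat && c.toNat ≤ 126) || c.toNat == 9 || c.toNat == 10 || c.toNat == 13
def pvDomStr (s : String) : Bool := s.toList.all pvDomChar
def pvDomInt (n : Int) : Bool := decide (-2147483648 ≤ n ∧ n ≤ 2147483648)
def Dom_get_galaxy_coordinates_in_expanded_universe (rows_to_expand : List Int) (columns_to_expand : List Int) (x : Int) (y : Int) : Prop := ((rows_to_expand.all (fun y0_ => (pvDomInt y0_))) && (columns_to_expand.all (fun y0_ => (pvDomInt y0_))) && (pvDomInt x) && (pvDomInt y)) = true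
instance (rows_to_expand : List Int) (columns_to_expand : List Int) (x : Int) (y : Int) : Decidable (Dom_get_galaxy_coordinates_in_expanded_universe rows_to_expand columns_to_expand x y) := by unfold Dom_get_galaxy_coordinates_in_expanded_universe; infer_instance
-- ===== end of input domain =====

-- B replaces the two per-cell counting loops by a closed form per axis:
-- coordinate + (factor-1) * number of distinct expanded lines below it.

-- ===== PORT A =====
def get_galaxy_coordinates_in_expanded_universe (rows_to_expand : List Int) (columns_to_expand : List Int) (x : Int) (y : Int) : Int × Int :=
  let expansion_factor : Int := 1000000
  let expanded_x : Int :=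
    (PySem.List.pyRange 0 x 1).foldl
      (fun acc i => acc + if i ∈ rows_to_expand then expansion_factor else 1) 0
  let expanded_y : Int :=
    (PySem.List.pyRange 0 y 1).foldl
      (fun acc i => acc + if i ∈ columns_to_expand then expansion_factor else 1) 0
  (expanded_x, expanded_y)

-- ===== PORT B =====
def get_galaxy_coordinates_in_expanded_universe_alt (rows_to_expand : List Int) (columns_to_expand : List Int) (x : Int) (y : Int) : Int × Int :=
  let expansion_factor : Int := 1000000
  let expanded_x : Int :=
    max x 0 + (expansion_factor - 1) *
      ((PySem.Set.ofList (rows_to_expand.filter (fun r => decide (0 ≤ r ∧ r < x)))).length : Int)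
  let expanded_y : Int :=
    max y 0 + (expansion_factor - 1) *
      ((PySem.Set.ofList (columns_to_expand.filter (fun c => decide (0 ≤ c ∧ c < y)))).length : Int)
  (expanded_x, expanded_y)

-- ===== PRECONDITION & SPEC =====
def Spec_get_galaxy_coordinates_in_expanded_universe (rows_to_expand : List Int) (columns_to_expand : List Int) (x : Int) (y : Int) (out : Int × Int) : Prop := out = get_galaxy_coordinates_in_expanded_universe_alt rows_to_expand columns_to_expand x y
instance (rows_to_expand : List Int) (columns_to_expand : List Int) (x : Int) (y : Int) (out : Int × Int) : Decidable (Spec_get_galaxy_coordinates_in_expanded_universe rows_to_expand columns_to_expand x y out) := by unfold Spec_get_galaxy_coordinates_in_expanded_universe; infer_instance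

-- ===== CLAIM (what is proved, stated in full; the proofs are below) =====
def Claim_equal_get_galaxy_coordinates_in_expanded_universe : Prop := ∀ (rows_to_expand : List Int) (columns_to_expand : List Int) (x : Int) (y : Int), Dom_get_galaxy_coordinates_in_expanded_universe rows_to_expand columns_to_expand x y → Spec_get_galaxy_coordinates_in_expanded_universe rows_to_expand columns_to_expand x y (get_galaxy_coordinates_in_expanded_universe rows_to_expand columns_to_expand x y)

-- ===== LEMMAS AND PROOFS =====

-- A's counting loop as a closed form over length and countP.
theorem foldl_if_const_add (p : Int → Prop) [DecidablePred p] (f : Int) :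
    ∀ (l : List Int) (a : Int),
      l.foldl (fun acc i => acc + if p i then f else 1) a
        = a + l.length + (f - 1) * l.countP (fun i => decide (p i)) := by
  intro l
  induction l with
  | nil => intro a; simp
  | cons hd tl ih =>
    intro a
    simp only [List.foldl_cons, List.countP_cons, ih]
    by_cases h : p hd <;> simp [h] <;> ring

-- the number of i ∈ [0,x) lying in rows equals the number of distinct elements of rows in [0,x)
theorem countP_range_eq_set_length (rows : List Int) (x : Int) :
    ((PySem.List.pyRange 0 x 1).countP (fun i => decide (i ∈ rows)))
      = (PySem.Set.ofList (rows.filter (fun r => decide (0 ≤ r ∧ r < x)))).length := by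
  rw [List.countP_eq_length_filter]
  apply List.Perm.length_eq
  rw [List.perm_ext_iff_of_nodup]
  · intro a
    simp [PySem.Set.mem_ofList, List.mem_filter, PySem.List.mem_pyRange_one, and_comm]
  · exact (PySem.List.nodup_pyRange_one 0 x).filter _
  · exact PySem.Set.nodup_ofList _

theorem axis_closed (rows : List Int) (x : Int) :
    (PySem.List.pyRange 0 x 1).foldl
        (fun acc i => acc + if i ∈ rows then (1000000 : Int) else 1) 0
      = max x 0 + (1000000 - 1) *
          ((PySem.Set.ofList (rows.filter (fun r => decide (0 ≤ r ∧ r < x)))).length : Int) := by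
  rw [foldl_if_const_add (fun i => i ∈ rows) 1000000, countP_range_eq_set_length,
    PySem.List.length_pyRange_one]
  have : ((x - 0).toNat : Int) = max x 0 := by omega
  rw [this]; ring

-- ===== VERDICT (by name: the statement is the Claim_ definition above) =====
theorem get_galaxy_coordinates_in_expanded_universe_spec : Claim_equal_get_galaxy_coordinates_in_expanded_universe := by
  intro rows cols x y _hdom
  show _ = _
  simp only [get_galaxy_coordinates_in_expanded_universe,
    get_galaxy_coordinates_in_expanded_universe_alt, axis_closed]
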